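-- pv_equiv track=rewrite | github.com/ykcoatepe/portfolio_exporter | portfolio_exporter/scripts/micro_momo_dashboard.py | _count_provenance
-- ===== SOURCE A (Python) =====
-- from typing import Any, Dict, List
--
-- def _count_provenance(rows: List[Dict[str, Any]], field: str = "src_vwap") -> Dict[str, int]:
--     out: Dict[str, int] = {"artifact": 0, "yahoo": 0, "csv": 0, "": 0}
--     for r in rows:
--         v = (r.get(field) or "").strip().lower()
--         if v in out:
--             out[v] += 1
--         else:
--             out[""] += 1
--     return out
-- ===== SOURCE B (Python) =====
-- from typing import Any, Dict, List
--
-- def _count_provenance(rows: List[Dict[str, Any]], field: str = "src_vwap") -> Dict[str, int]: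
--     # Stage 1: materialize the normalized values once.
--     vals = [(r.get(field) or "").strip().lower() for r in rows]
--     # Stage 2: one counting scan per known category; the catch-all is what remains.
--     a = vals.count("artifact")
--     y = vals.count("yahoo")
--     c = vals.count("csv")
--     return {"artifact": a, "yahoo": y, "csv": c, "": len(rows) - a - y - c}
-- ===== Notes on version B (the rewrite author's own statement) =====
-- stated objective: alternative
-- what changed: B keeps no dictionary accumulator at all: it materializes the normalized values once, then runs one list.count scan per known category ('artifact', 'yahoo', 'csv') and derives the catch-all '' bucket by subtraction len(rows)-a-y-c, instead of A's single pass that branches per row on dict membership and increments an accumulator dict.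
import Mathlib
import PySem

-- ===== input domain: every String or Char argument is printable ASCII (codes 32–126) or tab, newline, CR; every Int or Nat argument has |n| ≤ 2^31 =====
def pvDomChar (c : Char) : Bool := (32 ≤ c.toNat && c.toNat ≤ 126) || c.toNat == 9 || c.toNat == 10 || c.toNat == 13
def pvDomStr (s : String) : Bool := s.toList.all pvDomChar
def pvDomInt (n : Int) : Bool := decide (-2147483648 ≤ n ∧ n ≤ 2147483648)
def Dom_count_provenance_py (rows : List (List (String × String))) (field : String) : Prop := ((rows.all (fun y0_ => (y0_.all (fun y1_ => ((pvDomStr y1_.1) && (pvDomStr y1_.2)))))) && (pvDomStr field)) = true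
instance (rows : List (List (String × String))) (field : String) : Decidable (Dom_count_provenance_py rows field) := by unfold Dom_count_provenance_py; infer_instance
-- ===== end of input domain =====

-- B replaces A's per-row dict-membership branch by a normalize map followed by one count scan
-- per known category, with the '' bucket derived by subtraction (objective: alternative, same O(n)).


-- ===== PORT A =====
-- v = (r.get(field) or "").strip().lower(): r.get gives None for a missing key, which `or` maps
-- to ""; on a str value `or` keeps a non-empty string and maps "" to "" — so getD "" is exact here.
def pvNorm (r : List (String × String)) (field : String) : String :=
  PySem.Str.lower (PySem.Str.strip (((PySem.Dict.mk r).get? field).getD ""))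

def count_provenance_py (rows : List (List (String × String))) (field : String) : List (String × Int) :=
  let out : PySem.Dict String Int :=
    PySem.Dict.mk [("artifact", 0), ("yahoo", 0), ("csv", 0), ("", 0)]
  let out := rows.foldl (fun out r =>
    let v := pvNorm r field
    if out.contains v then out.modify v 0 (· + 1) else out.modify "" 0 (· + 1)) out
  out.items

-- ===== PORT B =====
def count_provenance_py_alt (rows : List (List (String × String))) (field : String) : List (String × Int) :=
  let vals := rows.map (fun r => pvNorm r field)
  let a := PySem.List.count vals "artifact"
  let y := PySem.List.count vals "yahoo"
  let c := PySem.List.count vals "csv"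
  [("artifact", a), ("yahoo", y), ("csv", c), ("", (rows.length : Int) - a - y - c)]

-- ===== PRECONDITION & SPEC =====
def Spec_count_provenance_py (rows : List (List (String × String))) (field : String) (out : List (String × Int)) : Prop := out = count_provenance_py_alt rows field
instance (rows : List (List (String × String))) (field : String) (out : List (String × Int)) : Decidable (Spec_count_provenance_py rows field out) := by unfold Spec_count_provenance_py; infer_instance

-- ===== CLAIM (what is proved, stated in full; the proofs are below) =====
def Claim_equal_count_provenance_py : Prop := ∀ (rows : List (List (String × String))) (field : String), Dom_count_provenance_py rows field → Spec_count_provenance_py rows field (count_provenance_py rows field)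

-- ===== LEMMAS AND PROOFS =====

-- proof-only abbreviations: A's four-key accumulator and A's loop body on a normalized value
def pvD (a y c e : Int) : PySem.Dict String Int :=
  PySem.Dict.mk [("artifact", a), ("yahoo", y), ("csv", c), ("", e)]

def pvStep (out : PySem.Dict String Int) (v : String) : PySem.Dict String Int :=
  if out.contains v then out.modify v 0 (· + 1) else out.modify "" 0 (· + 1)

lemma pvD_bump_artifact (a y c e : Int) :
    (pvD a y c e).insert "artifact" ((pvD a y c e).getD "artifact" 0 + 1) = pvD (a+1) y c e := by
  apply PySem.Dict.ext
  simp [pvD, PySem.Dict.items_insert, PySem.Dict.getD_eq_get?_getD, PySem.Dict.get?_mk_cons]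

lemma pvD_bump_yahoo (a y c e : Int) :
    (pvD a y c e).insert "yahoo" ((pvD a y c e).getD "yahoo" 0 + 1) = pvD a (y+1) c e := by
  apply PySem.Dict.ext
  simp [pvD, PySem.Dict.items_insert, PySem.Dict.getD_eq_get?_getD, PySem.Dict.get?_mk_cons]

lemma pvD_bump_csv (a y c e : Int) :
    (pvD a y c e).insert "csv" ((pvD a y c e).getD "csv" 0 + 1) = pvD a y (c+1) e := by
  apply PySem.Dict.ext
  simp [pvD, PySem.Dict.items_insert, PySem.Dict.getD_eq_get?_getD, PySem.Dict.get?_mk_cons]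

lemma pvD_bump_empty (a y c e : Int) :
    (pvD a y c e).insert "" ((pvD a y c e).getD "" 0 + 1) = pvD a y c (e+1) := by
  apply PySem.Dict.ext
  simp [pvD, PySem.Dict.items_insert, PySem.Dict.getD_eq_get?_getD, PySem.Dict.get?_mk_cons]

lemma pvStep_eq (a y c e : Int) (v : String) :
    pvStep (pvD a y c e) v =
      if v = "artifact" then pvD (a+1) y c e
      else if v = "yahoo" then pvD a (y+1) c e
      else if v = "csv" then pvD a y (c+1) e
      else pvD a y c (e+1) := by
  by_cases h1 : v = "artifact"
  · subst h1
    simpa [pvStep, pvD, PySem.Dict.modify] using pvD_bump_artifact a y c e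
  by_cases h2 : v = "yahoo"
  · subst h2
    simpa [pvStep, pvD, PySem.Dict.modify, h1] using pvD_bump_yahoo a y c e
  by_cases h3 : v = "csv"
  · subst h3
    simpa [pvStep, pvD, PySem.Dict.modify, h1, h2] using pvD_bump_csv a y c e
  by_cases h4 : v = ""
  · subst h4
    simpa [pvStep, pvD, PySem.Dict.modify, h1, h2, h3] using pvD_bump_empty a y c e
  · have hcond : ¬("artifact" = v ∨ "yahoo" = v ∨ "csv" = v) := by
      push Not
      exact ⟨fun h => h1 h.symm, fun h => h2 h.symm, fun h => h3 h.symm⟩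
    simpa [pvStep, pvD, PySem.Dict.modify, hcond, h1, h2, h3, h4] using pvD_bump_empty a y c e

lemma pvD_eq_iff (a y c e a' y' c' e' : Int) :
    pvD a y c e = pvD a' y' c' e' ↔ a = a' ∧ y = y' ∧ c = c' ∧ e = e' := by
  simp [pvD]

lemma pvAFold (ns : List String) (a y c e : Int) :
    ns.foldl pvStep (pvD a y c e)
    = pvD (a + ns.count "artifact") (y + ns.count "yahoo") (c + ns.count "csv")
        (e + ((ns.length : Int) - ns.count "artifact" - ns.count "yahoo" - ns.count "csv")) := by
  induction ns generalizing a y c e with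
  | nil => simp
  | cons v t ih =>
    rw [List.foldl_cons, pvStep_eq]
    split_ifs with h1 h2 h3
    · subst h1
      rw [ih, pvD_eq_iff, List.count_cons_self,
          List.count_cons_of_ne (by decide), List.count_cons_of_ne (by decide), List.length_cons]
      refine ⟨by push_cast; ring, rfl, rfl, by push_cast; ring⟩
    · subst h2
      rw [ih, pvD_eq_iff, List.count_cons_self,
          List.count_cons_of_ne (by decide), List.count_cons_of_ne (by decide), List.length_cons]
      refine ⟨rfl, by push_cast; ring, rfl, by push_cast; ring⟩
    · subst h3
      rw [ih, pvD_eq_iff, List.count_cons_self,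
          List.count_cons_of_ne (by decide), List.count_cons_of_ne (by decide), List.length_cons]
      refine ⟨rfl, rfl, by push_cast; ring, by push_cast; ring⟩
    · rw [ih, pvD_eq_iff, List.count_cons_of_ne h1,
          List.count_cons_of_ne h2, List.count_cons_of_ne h3, List.length_cons]
      refine ⟨rfl, rfl, rfl, by push_cast; ring⟩

-- ===== VERDICT (by name: the statement is the Claim_ definition above) =====
theorem count_provenance_py_spec : Claim_equal_count_provenance_py := by
  intro rows field _
  unfold Spec_count_provenance_py
  show count_provenance_py rows field = count_provenance_py_alt rows field
  simp only [count_provenance_py, count_provenance_py_alt]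
  rw [show (fun (out : PySem.Dict String Int) (r : List (String × String)) =>
        let v := pvNorm r field
        if out.contains v then out.modify v 0 (· + 1) else out.modify "" 0 (· + 1))
      = fun out r => pvStep out (pvNorm r field) from rfl]
  rw [← List.foldl_map (f := fun r => pvNorm r field)
        (g := fun (out : PySem.Dict String Int) v => pvStep out v) (l := rows)]
  rw [show PySem.Dict.mk [("artifact", (0:Int)), ("yahoo", 0), ("csv", 0), ("", 0)]
      = pvD 0 0 0 0 from rfl]
  rw [pvAFold]
  simp [pvD, PySem.List.count_eq]
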